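-- pv_equiv track=rewrite | github.com/JeffW12345/check-if-a-before-b | a_before_b.py | solution
-- ===== SOURCE A (Python) =====
-- def solution(S):
--     string = S
--     if 'a' not in string:
--         return True
--     string_as_list = list(string)
--     a_yet = False
--     b_yet = False
--     for char in string_as_list:
--         if char == 'a':
--             a_yet = True
--         if char == 'b':
--             b_yet = True
--         if char == 'b' and a_yet is False:
--             return False
--         if char == 'a' and b_yet is True:
--             return False
--     return True
-- ===== SOURCE B (Python) =====
-- def solution(S):
--     _, _, tail = S.partition('b')
--     return 'a' not in tail
-- ===== Notes on version B (the rewrite author's own statement) =====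
-- stated objective: simpler
-- what changed: Replaced A's two-flag single-pass state machine with early returns by a closed check: partition the string at the first occurrence of the second letter and test that the first letter does not occur in the tail.
import Mathlib
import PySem

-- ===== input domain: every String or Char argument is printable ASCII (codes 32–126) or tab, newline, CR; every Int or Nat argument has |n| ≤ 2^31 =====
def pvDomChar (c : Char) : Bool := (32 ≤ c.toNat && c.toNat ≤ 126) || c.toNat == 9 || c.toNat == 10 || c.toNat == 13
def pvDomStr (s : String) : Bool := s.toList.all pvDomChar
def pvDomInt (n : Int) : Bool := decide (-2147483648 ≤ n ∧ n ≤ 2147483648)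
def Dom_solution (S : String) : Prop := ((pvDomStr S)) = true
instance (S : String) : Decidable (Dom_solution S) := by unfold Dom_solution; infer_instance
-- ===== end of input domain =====

-- B replaces A's two-flag state machine with a split at the first 'b' plus a membership test (simpler).

-- ===== PORT A =====
-- the for-loop over list(string) with the two flags and the early 'return False's
def pvLoopA : List Char → Bool → Bool → Bool
  | [], _, _ => true
  | c :: cs, aYet, bYet =>
    let aYet' := if c == 'a' then true else aYet
    let bYet' := if c == 'b' then true else bYet
    if c == 'b' && !aYet' then false
    else if c == 'a' && bYet' then false
    else pvLoopA cs aYet' bYet'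

def solution (S : String) : Bool :=
  -- "'a' not in string": membership of the single character 'a'
  if !(S.toList.contains 'a') then true
  else pvLoopA S.toList false false

-- ===== PORT B =====
-- S.partition('b') for the one-character separator 'b': the third component is
-- everything after the first 'b' ("" if there is no 'b'); exact on that domain.
def pvTailAfterB : List Char → List Char
  | [] => []
  | c :: cs => if c == 'b' then cs else pvTailAfterB cs

def solution_alt (S : String) : Bool :=
  !((pvTailAfterB S.toList).contains 'a')

-- ===== PRECONDITION & SPEC =====
def Spec_solution (S : String) (out : Bool) : Prop := out = solution_alt S
instance (S : String) (out : Bool) : Decidable (Spec_solution S out) := by unfold Spec_solution; infer_instance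

-- ===== CLAIM (what is proved, stated in full; the proofs are below) =====
def Claim_equal_solution : Prop := ∀ (S : String), Dom_solution S → Spec_solution S (solution S)

-- ===== LEMMAS AND PROOFS =====

-- after a 'b' has been seen with an 'a' before it, the loop succeeds iff no 'a' remains
theorem pvLoopA_tt_tt (cs : List Char) : pvLoopA cs true true = !(cs.contains 'a') := by
  induction cs with
  | nil => simp [pvLoopA]
  | cons c cs ih =>
      by_cases hc : c = 'a'
      · simp [pvLoopA, hc]
      · by_cases hb : c = 'b'
        · simp [pvLoopA, hb, ih]
        · simp [pvLoopA, hb, hc, ih, Ne.symm hc]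

-- with an 'a' seen and no 'b' yet, the loop succeeds iff no 'a' occurs after the first 'b'
theorem pvLoopA_tt_ff (cs : List Char) :
    pvLoopA cs true false = !((pvTailAfterB cs).contains 'a') := by
  induction cs with
  | nil => simp [pvLoopA, pvTailAfterB]
  | cons c cs ih =>
      by_cases hb : c = 'b'
      · simp [pvLoopA, pvTailAfterB, hb, pvLoopA_tt_tt]
      · by_cases ha : c = 'a' <;> simp [pvLoopA, pvTailAfterB, hb, ha, ih]

theorem contains_pvTailAfterB (cs : List Char) (h : 'a' ∉ cs) :
    (pvTailAfterB cs).contains 'a' = false := by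
  induction cs with
  | nil => simp [pvTailAfterB]
  | cons c cs ih =>
      have h2 : 'a' ∉ cs := fun hm => h (List.mem_cons_of_mem _ hm)
      by_cases hb : c = 'b'
      · simp [pvTailAfterB, hb, h2]
      · simpa [pvTailAfterB, hb] using ih h2

-- when the string contains an 'a', the full loop from the initial state matches B
theorem pvLoopA_ff_ff (cs : List Char) (h : 'a' ∈ cs) :
    pvLoopA cs false false = !((pvTailAfterB cs).contains 'a') := by
  induction cs with
  | nil => cases h
  | cons c cs ih =>
      by_cases ha : c = 'a'
      · simp [pvLoopA, pvTailAfterB, ha, pvLoopA_tt_ff]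
      · have hmem : 'a' ∈ cs := by
          rcases List.mem_cons.mp h with h1 | h1
          · exact absurd h1.symm ha
          · exact h1
        by_cases hb : c = 'b'
        · simp [pvLoopA, pvTailAfterB, hb, hmem]
        · simp [pvLoopA, pvTailAfterB, hb, ha, ih hmem]

-- ===== VERDICT (by name: the statement is the Claim_ definition above) =====
theorem solution_spec : Claim_equal_solution := by
  intro S _
  unfold Spec_solution solution solution_alt
  by_cases h : 'a' ∈ S.toList
  · simp [h, pvLoopA_ff_ff _ h]
  · have := contains_pvTailAfterB S.toList h
    simp only [List.contains_eq_mem, decide_eq_false_iff_not] at this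
    simp [h, this]
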